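-- pv_equiv track=rewrite | github.com/KKosukeee/CodingQuestions | LeetCode/809_expressive_words.py | ugly_solution
-- ===== SOURCE A (Python) =====
-- from itertools import groupby
-- from typing import List
--
-- def ugly_solution(S: str, words: List[str]) -> int:
--   """
--   An ugly solution that works and runs in O(len(S)+len(W)*max(len(W[i])) in time
--   and space
--
--   Args:
--     S:
--     words:
--
--   Returns:
--
--   """
--   count = 0
--   k, v = [], []
--   for key, value in groupby(S):
--     k.append(key)
--     v.append(list(value))
--   kk, vv = [], []
--   for word in words:
--     kkk, vvv = [], []
--     for key, value in groupby(word):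
--       kkk.append(key)
--       vvv.append(list(value))
--     kk.append(kkk)
--     vv.append(vvv)
--   for kkk, vvv in zip(kk, vv):
--     valid = True
--     if len(kkk) != len(k) or kkk != k:
--       continue
--     for _v, _vvv in zip(v, vvv):
--       if len(_v) < len(_vvv):
--         valid = False
--         break
--       if len(_v) < 3 and len(_v) != len(_vvv):
--         valid = False
--         break
--     count += int(valid)
--   return count
-- ===== SOURCE B (Python) =====
-- def _stretchable(S, w):
--     """Lookback check: scan S once; each char either pairs with the next char of w,
--     or is skippable because it sits inside a run of length >= 3 in S (detected via
--     the two previous chars or the previous+next char). No run lengths are computed."""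
--     n, m = len(S), len(w)
--     j = 0
--     p1 = p2 = None
--     for i in range(n):
--         ch = S[i]
--         if j < m and w[j] == ch:
--             j += 1
--         elif p1 == ch and p2 == ch:
--             pass
--         elif p1 == ch and i + 1 < n and S[i + 1] == ch:
--             pass
--         else:
--             return False
--         p2, p1 = p1, ch
--     return j == m
--
--
-- def ugly_solution(S, words):
--     count = 0
--     for w in words:
--         count += _stretchable(S, w)
--     return count
-- ===== Notes on version B (the rewrite author's own statement) =====
-- stated objective: alternative
-- what changed: A builds groupby key/value tables (lists of chars) for S and every word and compares run tables; B computes no run tables at all: a single lookback scan of S pairs each char with the next char of the word or skips it when the two previous chars (or previous+next char) show it lies inside a run of length >= 3 in S, avoiding all intermediate group lists.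
import Mathlib
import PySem

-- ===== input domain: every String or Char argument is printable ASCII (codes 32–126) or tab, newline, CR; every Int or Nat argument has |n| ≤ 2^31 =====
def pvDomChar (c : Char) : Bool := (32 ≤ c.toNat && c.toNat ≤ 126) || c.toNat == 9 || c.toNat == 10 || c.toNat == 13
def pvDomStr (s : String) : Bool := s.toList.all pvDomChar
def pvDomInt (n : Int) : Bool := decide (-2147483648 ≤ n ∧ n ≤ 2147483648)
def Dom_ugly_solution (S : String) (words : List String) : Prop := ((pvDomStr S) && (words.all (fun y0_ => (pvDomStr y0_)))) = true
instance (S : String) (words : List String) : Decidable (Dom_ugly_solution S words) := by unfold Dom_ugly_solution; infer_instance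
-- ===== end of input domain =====

-- B replaces A's groupby tables and run-length comparison with a lookback scan that
-- computes no run lengths at all: each char of S either pairs with the next char of
-- the word or is skipped because its two neighbours show it sits in a run of ≥ 3
-- (objective: alternative).

-- ===== PORT A =====
-- itertools.groupby over a string, each group consumed into a list (A consumes every group)
def pyGroupby : List Char → List (Char × List Char)
  | [] => []
  | c :: rest => (c, c :: rest.takeWhile (· == c)) :: pyGroupby (rest.dropWhile (· == c))
termination_by l => l.length
decreasing_by exact Nat.lt_succ_of_le (List.length_dropWhile_le _ _)

-- A's inner 'for _v, _vvv in zip(v, vvv)' loop with its two breaks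
def checkRuns : List (List Char × List Char) → Bool
  | [] => true
  | (a, b) :: t =>
    if a.length < b.length then false
    else if a.length < 3 ∧ a.length ≠ b.length then false
    else checkRuns t

def ugly_solution (S : String) (words : List String) : Int :=
  let g := pyGroupby S.toList
  let k := g.map Prod.fst
  let v := g.map Prod.snd
  let kk := words.map (fun w => (pyGroupby w.toList).map Prod.fst)
  let vv := words.map (fun w => (pyGroupby w.toList).map Prod.snd)
  (List.zip kk vv).foldl
    (fun count kv =>
      if kv.1.length ≠ k.length ∨ kv.1 ≠ k then count
      else count + (if checkRuns (List.zip v kv.2) then 1 else 0))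
    (0 : Int)

-- ===== PORT B =====
-- _stretchable's index loop over S, ported as structural recursion on S's char list:
-- p2/p1 carry S[i-2]/S[i-1], s.head? is the S[i+1] lookahead, w is the unconsumed word
def chk : Option Char → Option Char → List Char → List Char → Bool
  | _, _, [], w => w.isEmpty
  | p2, p1, a :: s, w =>
    if w.head? = some a then chk p1 (some a) s w.tail
    else if p1 = some a ∧ p2 = some a then chk p1 (some a) s w
    else if p1 = some a ∧ s.head? = some a then chk p1 (some a) s w
    else false

def ugly_solution_alt (S : String) (words : List String) : Int :=
  words.foldl (fun count w => count + (if chk none none S.toList w.toList then 1 else 0)) (0 : Int)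

-- ===== PRECONDITION & SPEC =====
def Spec_ugly_solution (S : String) (words : List String) (out : Int) : Prop := out = ugly_solution_alt S words
instance (S : String) (words : List String) (out : Int) : Decidable (Spec_ugly_solution S words out) := by unfold Spec_ugly_solution; infer_instance

-- ===== CLAIM (what is proved, stated in full; the proofs are below) =====
def Claim_equal_ugly_solution : Prop := ∀ (S : String) (words : List String), Dom_ugly_solution S words → Spec_ugly_solution S words (ugly_solution S words)

-- ===== LEMMAS AND PROOFS =====

-- proof-side intermediate: run-length table of S and the run-by-run matching rule
def buildRuns : List Char → List (Char × Nat)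
  | [] => []
  | c :: rest => (c, 1 + (rest.takeWhile (· == c)).length) :: buildRuns (rest.dropWhile (· == c))
termination_by l => l.length
decreasing_by exact Nat.lt_succ_of_le (List.length_dropWhile_le _ _)

def matchRuns : List (Char × Nat) → List Char → Bool
  | [], w => w.isEmpty
  | (c, rs) :: rest, w =>
    match w with
    | [] => false
    | b :: _ =>
      if b ≠ c then false
      else
        let rw := (w.takeWhile (· == c)).length
        if rs < rw then false
        else if rs < 3 ∧ rs ≠ rw then false
        else matchRuns rest (w.dropWhile (· == c))

-- consuming one matching char advances both pointers
theorem chk_consume (p2 p1 : Option Char) (c : Char) (s w : List Char) :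
    chk p2 p1 (c :: s) (c :: w) = chk p1 (some c) s w := by
  simp [chk]

-- consuming t+1 matching chars; the carried lookback ends at (c, c) unless only one was consumed
theorem chk_consumeN : ∀ (t : Nat) (c : Char) (s w : List Char) (p2 p1 : Option Char),
    chk p2 p1 (List.replicate (t+1) c ++ s) (List.replicate (t+1) c ++ w)
      = if t = 0 then chk p1 (some c) s w else chk (some c) (some c) s w := by
  intro t
  induction t with
  | zero => intro c s w p2 p1; simp [List.replicate_succ, chk_consume]
  | succ t ih =>
    intro c s w p2 p1
    rw [List.replicate_succ (n := t+1), List.cons_append, List.cons_append, chk_consume, ih]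
    cases t <;> simp

-- inside a run with both lookbacks equal to c, unmatched chars are skipped
theorem chk_skip : ∀ (m : Nat) (c : Char) (s w : List Char), w.head? ≠ some c →
    chk (some c) (some c) (List.replicate m c ++ s) w = chk (some c) (some c) s w := by
  intro m
  induction m with
  | zero => intro c s w _; simp
  | succ m ih =>
    intro c s w hw
    rw [List.replicate_succ, List.cons_append]
    show chk (some c) (some c) (c :: (List.replicate m c ++ s)) w = _
    rw [show chk (some c) (some c) (c :: (List.replicate m c ++ s)) w
          = chk (some c) (some c) (List.replicate m c ++ s) w by simp [chk, hw]]
    exact ih c s w hw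

-- a fresh unmatched char with no lookback support rejects
theorem chk_dead (p2 p1 : Option Char) (c : Char) (s w : List Char)
    (hw : w.head? ≠ some c) (hp : p1 ≠ some c) :
    chk p2 p1 (c :: s) w = false := by
  simp [chk, hw, hp]

-- one consumed char of the run: skipping needs the lookahead
theorem chk_skipOne (p2 : Option Char) (c : Char) (s w : List Char)
    (hw : w.head? ≠ some c) (hp : p2 ≠ some c) :
    chk p2 (some c) (c :: s) w
      = if s.head? = some c then chk (some c) (some c) s w else false := by
  simp [chk, hw, hp]

theorem takeWhile_eq_replicate (c : Char) (l : List Char) :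
    l.takeWhile (· == c) = List.replicate (l.takeWhile (· == c)).length c := by
  apply List.eq_replicate_length.mpr
  intro b hb
  simpa using List.mem_takeWhile_imp hb

theorem head?_dropWhile_ne (c : Char) (l : List Char) :
    ∀ d, (l.dropWhile (· == c)).head? = some d → d ≠ c := by
  induction l with
  | nil => intro d h; simp at h
  | cons a l ih =>
    intro d h
    by_cases hac : a = c
    · subst hac
      rw [List.dropWhile_cons_of_pos (by simp)] at h
      exact ih d h
    · rw [List.dropWhile_cons_of_neg (by simpa using hac)] at h
      simp at h
      intro hdc; exact hac (h.trans hdc)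

-- the lookback scan, started at a run boundary, equals the run-by-run rule
theorem chk_eq : ∀ (n : Nat) (s w : List Char) (p2 p1 : Option Char), s.length ≤ n →
    (∀ c, s.head? = some c → p1 ≠ some c) →
    chk p2 p1 s w = matchRuns (buildRuns s) w := by
  intro n
  induction n with
  | zero =>
    intro s w p2 p1 hs _
    have : s = [] := List.eq_nil_of_length_eq_zero (Nat.le_zero.mp hs)
    subst this
    simp [chk, buildRuns, matchRuns]
  | succ n ih =>
    intro s w p2 p1 hs hp
    cases s with
    | nil => simp [chk, buildRuns, matchRuns]
    | cons c s₀ =>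
      have hp1 : p1 ≠ some c := hp c (by simp)
      have hslen : s₀.length ≤ n := by simpa [Nat.succ_le_succ_iff] using hs
      set t := (s₀.takeWhile (· == c)).length with ht
      set s' := s₀.dropWhile (· == c) with hs'
      have hs'len : s'.length ≤ n := le_trans (List.length_dropWhile_le _ _) hslen
      have hs'h : ∀ d, s'.head? = some d → d ≠ c := head?_dropWhile_ne c s₀
      have hdec : s₀ = List.replicate t c ++ s' := by
        conv_lhs => rw [← List.takeWhile_append_dropWhile (p := (· == c)) (l := s₀)]
        rw [← takeWhile_eq_replicate]
      have hbuild : buildRuns (c :: s₀) = (c, 1 + t) :: buildRuns s' := by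
        rw [buildRuns]
      clear_value t s'
      cases w with
      | nil =>
        rw [chk_dead p2 p1 c s₀ [] (by simp) hp1, hbuild, matchRuns]
      | cons b w₁ =>
        by_cases hbc : b = c
        · subst hbc
          set q1 := (w₁.takeWhile (· == b)).length with hq1
          set w' := w₁.dropWhile (· == b) with hw'
          have hw'h : ∀ d, w'.head? = some d → d ≠ b := head?_dropWhile_ne b w₁
          have hw'hne : w'.head? ≠ some b := by
            intro h; exact hw'h b h rfl
          have hwdec : w₁ = List.replicate q1 b ++ w' := by
            conv_lhs => rw [← List.takeWhile_append_dropWhile (p := (· == b)) (l := w₁)]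
            rw [← takeWhile_eq_replicate]
          have hrw : ((b :: w₁).takeWhile (· == b)).length = 1 + q1 := by
            rw [List.takeWhile_cons_of_pos (by simp)]; simp [hq1, Nat.add_comm]
          have hdw : (b :: w₁).dropWhile (· == b) = w' := by
            rw [List.dropWhile_cons_of_pos (by simp)]
          -- matchRuns side value
          rw [hbuild, matchRuns]
          simp only [if_neg (by simp : ¬ (b ≠ b)), hrw, hdw]
          -- chk side: both lists start with their c-runs
          have hsdec : b :: s₀ = List.replicate (t+1) b ++ s' := by
            rw [hdec, List.replicate_succ, List.cons_append]
          have hwdec2 : b :: w₁ = List.replicate (q1+1) b ++ w' := by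
            rw [hwdec, List.replicate_succ, List.cons_append]
          clear_value q1 w'
          rcases lt_trichotomy q1 t with hlt | heq | hgt
          · -- word run shorter: q = q1+1 < p = t+1
            have hts : t + 1 = (q1 + 1) + (t - q1) := by omega
            have hrep : List.replicate (t+1) b ++ s'
                = List.replicate (q1+1) b ++ (List.replicate (t - q1) b ++ s') := by
              rw [← List.append_assoc, ← List.replicate_add, ← hts]
            rw [hsdec, hwdec2, hrep, chk_consumeN]
            have hcond1 : ¬ (1 + t < 1 + q1) := by omega
            rw [if_neg hcond1]
            by_cases hq0 : q1 = 0
            · -- exactly one char of the run matched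
              subst hq0
              have hts2 : t - 0 = (t - 1) + 1 := by omega
              rw [hts2, List.replicate_succ, List.cons_append,
                  chk_skipOne p1 b _ w' hw'hne hp1]
              by_cases ht2 : 2 ≤ t
              · -- run of length ≥ 3 in S: skip through it
                have hh : (List.replicate (t-1) b ++ s').head? = some b := by
                  have : t - 1 = (t-2) + 1 := by omega
                  rw [this, List.replicate_succ, List.cons_append]; rfl
                rw [if_pos hh, chk_skip _ b s' w' hw'hne,
                    ih s' w' (some b) (some b) hs'len (fun d hd => by
                      intro hdb; exact hs'h d hd (by simpa using hdb.symm))]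
                rw [if_neg (by omega : ¬ ((1:Nat) + t < 3 ∧ (1 + t) ≠ (1 + 0)))]
                simp
              · -- run of length 2 in S, word run 1: reject
                have ht1 : t = 1 := by omega
                subst ht1
                simp only [Nat.sub_self, List.replicate_zero, List.nil_append]
                have hh : ¬ (s'.head? = some b) := by
                  intro h; exact hs'h b h rfl
                rw [if_neg hh, if_pos (by omega : (1:Nat) + 1 < 3 ∧ (1 + 1) ≠ (1 + 0))]
                simp
            · -- at least two chars matched: lookbacks are (b, b), skip the rest
              rw [if_neg hq0, chk_skip _ b s' w' hw'hne,
                  ih s' w' (some b) (some b) hs'len (fun d hd => by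
                    intro hdb; exact hs'h d hd (by simpa using hdb.symm))]
              rw [if_neg (by omega : ¬ ((1:Nat) + t < 3 ∧ (1 + t) ≠ (1 + q1)))]
          · -- equal runs: recurse into the next run
            subst heq
            rw [hsdec, hwdec2, chk_consumeN,
                if_neg (by omega : ¬ (1 + q1 < 1 + q1)),
                if_neg (by omega : ¬ ((1:Nat) + q1 < 3 ∧ (1 + q1) ≠ (1 + q1)))]
            have hih := fun pp2 pp1 hpp => ih s' w' pp2 pp1 hs'len hpp
            by_cases ht0 : q1 = 0
            · rw [if_pos ht0]
              exact hih p1 (some b) (fun d hd => by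
                intro hdb; exact hs'h d hd (by simpa using hdb.symm))
            · rw [if_neg ht0]
              exact hih (some b) (some b) (fun d hd => by
                intro hdb; exact hs'h d hd (by simpa using hdb.symm))
          · -- word run longer: q1+1 > t+1, reject
            have hts : q1 + 1 = (t + 1) + (q1 - t) := by omega
            have hrep : List.replicate (q1+1) b ++ w'
                = List.replicate (t+1) b ++ (List.replicate (q1 - t) b ++ w') := by
              rw [← List.append_assoc, ← List.replicate_add, ← hts]
            rw [hsdec, hwdec2, hrep, chk_consumeN,
                if_pos (by omega : 1 + t < 1 + q1)]
            have hqt : q1 - t = (q1 - t - 1) + 1 := by omega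
            have hWhead : (List.replicate (q1 - t) b ++ w').head? = some b := by
              rw [hqt, List.replicate_succ, List.cons_append]; rfl
            have hfalse : ∀ (pp2 pp1 : Option Char), pp1 = some b →
                chk pp2 pp1 s' (List.replicate (q1 - t) b ++ w') = false := by
              intro pp2 pp1 hpp
              cases hsc : s' with
              | nil =>
                have hrepw : List.replicate (q1 - t) b ++ w'
                    = b :: (List.replicate (q1 - t - 1) b ++ w') := by
                  rw [hqt, List.replicate_succ, List.cons_append]
                  simp
                simp [chk, hrepw]
              | cons d s'' =>
                have hdb : d ≠ b := hs'h d (by rw [hsc]; rfl)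
                apply chk_dead
                · rw [hWhead]
                  simpa using Ne.symm hdb
                · rw [hpp]
                  simpa using Ne.symm hdb
            by_cases ht0 : t = 0
            · rw [if_pos ht0]; exact hfalse p1 (some b) rfl
            · rw [if_neg ht0]; exact hfalse (some b) (some b) rfl
        · -- word starts with the wrong char
          rw [chk_dead p2 p1 c s₀ (b :: w₁) (by simpa using hbc) hp1,
              hbuild, matchRuns]
          simp [hbc]

theorem chk_word (s w : List Char) : chk none none s w = matchRuns (buildRuns s) w :=
  chk_eq s.length s w none none (le_refl _) (by intro c _; simp)

-- per-word equivalence: the run-by-run rule equals A's key comparison plus run check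
theorem matchRuns_eq : ∀ (n : Nat) (s w : List Char), s.length ≤ n →
    ((matchRuns (buildRuns s) w = true) ↔
      ((pyGroupby w).map Prod.fst = (pyGroupby s).map Prod.fst ∧
        checkRuns (List.zip ((pyGroupby s).map Prod.snd) ((pyGroupby w).map Prod.snd)) = true)) := by
  intro n
  induction n with
  | zero =>
      intro s w hs
      have : s = [] := List.eq_nil_of_length_eq_zero (Nat.le_zero.mp hs)
      subst this
      cases w <;> simp [buildRuns, matchRuns, pyGroupby, checkRuns]
  | succ n ih =>
      intro s w hs
      cases s with
      | nil => cases w <;> simp [buildRuns, matchRuns, pyGroupby, checkRuns]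
      | cons a s =>
        cases w with
        | nil => simp [buildRuns, matchRuns, pyGroupby]
        | cons b w =>
          rw [buildRuns, matchRuns]
          by_cases hab : b = a
          · subst hab
            simp only [if_neg (by simp : ¬ (b ≠ b))]
            have htw : (b :: w).takeWhile (· == b) = b :: w.takeWhile (· == b) :=
              List.takeWhile_cons_of_pos (by simp)
            have hdw : (b :: w).dropWhile (· == b) = w.dropWhile (· == b) :=
              List.dropWhile_cons_of_pos (by simp)
            rw [htw, hdw]
            simp only [pyGroupby, List.map_cons, List.zip_cons_cons, checkRuns,
              List.length_cons, List.length_cons]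
            have hrec := ih (s.dropWhile (· == b)) (w.dropWhile (· == b))
              (by
                simp only [List.length_cons] at hs
                have := List.length_dropWhile_le (· == b) s
                omega)
            simp only [Nat.add_comm 1 ((List.takeWhile (fun x => x == b) s).length)]
            split_ifs with h1 h2
            · simp
            · simp
            · rw [hrec]
              simp
          · simp only [if_pos (by simpa using hab : b ≠ a)]
            simp only [pyGroupby, List.map_cons]
            constructor
            · intro h; exact absurd h Bool.false_ne_true
            · rintro ⟨hk, -⟩
              exact absurd (List.cons_eq_cons.mp hk).1 hab

-- one step of A's counting loop equals one step of B's
theorem step_eq (S : String) (count : Int) (w : String) :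
    (if ((pyGroupby w.toList).map Prod.fst).length ≠ ((pyGroupby S.toList).map Prod.fst).length ∨
        (pyGroupby w.toList).map Prod.fst ≠ (pyGroupby S.toList).map Prod.fst then count
     else count + (if checkRuns (List.zip ((pyGroupby S.toList).map Prod.snd)
        ((pyGroupby w.toList).map Prod.snd)) then 1 else 0)) =
    count + (if chk none none S.toList w.toList then 1 else 0) := by
  rw [chk_word]
  have heq := matchRuns_eq S.toList.length S.toList w.toList (le_refl _)
  by_cases hk : (pyGroupby w.toList).map Prod.fst = (pyGroupby S.toList).map Prod.fst
  · rw [if_neg (by simp [hk])]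
    by_cases hch : checkRuns (List.zip ((pyGroupby S.toList).map Prod.snd)
        ((pyGroupby w.toList).map Prod.snd)) = true
    · rw [if_pos hch, if_pos (heq.mpr ⟨hk, hch⟩)]
    · rw [if_neg hch, if_neg (fun h => hch (heq.mp h).2)]
  · rw [if_pos (Or.inr hk), if_neg (fun h => hk (heq.mp h).1)]
    simp

theorem fold_eq (S : String) (words : List String) (count : Int) :
    (List.zip (words.map (fun w => (pyGroupby w.toList).map Prod.fst))
              (words.map (fun w => (pyGroupby w.toList).map Prod.snd))).foldl
      (fun count kv =>
        if kv.1.length ≠ ((pyGroupby S.toList).map Prod.fst).length ∨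
           kv.1 ≠ (pyGroupby S.toList).map Prod.fst then count
        else count + (if checkRuns (List.zip ((pyGroupby S.toList).map Prod.snd) kv.2) then 1 else 0))
      count =
    words.foldl (fun count w => count + (if chk none none S.toList w.toList then 1 else 0)) count := by
  induction words generalizing count with
  | nil => rfl
  | cons w ws ih =>
      simp only [List.map_cons, List.zip_cons_cons, List.foldl_cons]
      rw [step_eq S count w]
      exact ih _

-- ===== VERDICT (by name: the statement is the Claim_ definition above) =====
theorem ugly_solution_spec : Claim_equal_ugly_solution := by
  intro S words _
  show ugly_solution S words = ugly_solution_alt S words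
  unfold ugly_solution ugly_solution_alt
  exact fold_eq S words 0
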